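-- pv_equiv track=rewrite | github.com/laochendeai/work | tools/optimize_auto_sources.py | is_valid_source_url
-- ===== SOURCE A (Python) =====
-- def is_valid_source_url(url: str) -> bool:
--     """检查URL是否为有效的数据源URL"""
--     # 排除详情页
--     excluded_patterns = [
--         '.htm', '.html',
--         '/detail',
--         '/showinfo',
--         '/view',
--         '/show',  # 显示页面
--         '/article',
--         '/content',
--         '/news/',  # 新闻详情
--         't202',    # 时间戳开头
--         '/202',    # 年份开头
--         '/id=',    # ID参数
--         '?',       # 有查询参数（通常是详情页）
--     ]
--
--     url_lower = url.lower()
--     return not any(pattern in url_lower for pattern in excluded_patterns)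
-- ===== SOURCE B (Python) =====
-- _EXCLUDED_PATTERNS = [
--     '.htm', '.html',
--     '/detail',
--     '/showinfo',
--     '/view',
--     '/show',
--     '/article',
--     '/content',
--     '/news/',
--     't202',
--     '/202',
--     '/id=',
--     '?',
-- ]
--
--
-- def _build_trie(patterns):
--     """Prefix trie of the patterns: nested dicts, '$' marks a complete pattern."""
--     root = {}
--     for p in patterns:
--         node = root
--         for ch in p:
--             node = node.setdefault(ch, {})
--         node['$'] = True
--     return root
--
--
-- _TRIE = _build_trie(_EXCLUDED_PATTERNS)
--
--
-- def is_valid_source_url(url: str) -> bool: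
--     """检查URL是否为有效的数据源URL"""
--     # One trie descent per position tests all excluded patterns at once.
--     n = len(url)
--     for i in range(n):
--         node = _TRIE
--         for j in range(i, n):
--             node = node.get(url[j].lower())
--             if node is None:
--                 break
--             if '$' in node:
--                 return False
--     return True
-- ===== Notes on version B (the rewrite author's own statement) =====
-- stated objective: alternative
-- what changed: B stores the excluded patterns in a prefix trie built once and, instead of A's separate case-insensitive substring search per pattern over the lowered URL, performs one trie descent per URL position that tests all patterns simultaneously.
import Mathlib
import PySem

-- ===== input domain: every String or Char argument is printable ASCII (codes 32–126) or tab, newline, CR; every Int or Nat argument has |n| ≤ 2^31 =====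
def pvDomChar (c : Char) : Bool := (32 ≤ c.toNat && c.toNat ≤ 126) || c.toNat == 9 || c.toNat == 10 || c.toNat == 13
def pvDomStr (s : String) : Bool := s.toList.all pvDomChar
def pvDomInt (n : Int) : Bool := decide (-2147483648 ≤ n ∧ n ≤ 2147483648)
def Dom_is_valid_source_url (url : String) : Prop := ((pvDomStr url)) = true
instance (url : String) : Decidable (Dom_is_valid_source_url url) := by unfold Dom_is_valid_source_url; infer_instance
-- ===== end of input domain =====

-- B stores the excluded patterns in a prefix trie built once; instead of A's separate
-- lowered-substring search per pattern, one trie descent per URL position tests all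
-- patterns simultaneously (objective: alternative).

-- ===== PORT A =====
def pvPatsA : List String :=
  [".htm", ".html", "/detail", "/showinfo", "/view", "/show",
   "/article", "/content", "/news/", "t202", "/202", "/id=", "?"]

def is_valid_source_url (url : String) : Bool :=
  let url_lower := PySem.Str.lower url
  !(pvPatsA.any (fun p => PySem.Str.isIn p url_lower))

-- ===== PORT B =====
-- Source B's nested-dict trie: a node is a terminal flag ('$' key) plus an association
-- list of children (mutual pair instead of a nested inductive).
mutual
inductive PTrie where
  | mk : Bool → PTrieL → PTrie
inductive PTrieL where
  | nil : PTrieL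
  | cons : Char → PTrie → PTrieL → PTrieL
end

-- node.get(ch): first (only) child labelled c
def pvChild : PTrieL → Char → Option PTrie
  | .nil, _ => none
  | .cons c' t rest, c => if c' = c then some t else pvChild rest c

mutual
-- insert one pattern's characters (the inner loop of _build_trie, with node['$']=True at the end)
def pvTrieInsert : PTrie → List Char → PTrie
  | .mk _ ch, [] => .mk true ch
  | .mk b ch, c :: cs => .mk b (pvChildInsert ch c cs)
-- node.setdefault(ch, {}) then continue inserting: extend the matching child, or append a fresh one
def pvChildInsert : PTrieL → Char → List Char → PTrieL
  | .nil, c, cs => .cons c (pvTrieInsert (.mk false .nil) cs) .nil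
  | .cons c' t rest, c, cs =>
      if c' = c then .cons c' (pvTrieInsert t cs) rest
      else .cons c' t (pvChildInsert rest c cs)
end

def pvChildrenOf : PTrie → PTrieL
  | .mk _ ch => ch

-- _TRIE = _build_trie(_EXCLUDED_PATTERNS)
def pvTrieB : PTrie :=
  pvPatsA.foldl (fun t p => pvTrieInsert t p.toList) (.mk false .nil)

-- the inner loop of B: node = node.get(url[j].lower()); break on None; return False on '$'
def pvDescend : PTrieL → List Char → Bool
  | _, [] => false
  | ch, c :: cs =>
    match pvChild ch (PySem.Chars.lowerChar c) with
    | none => false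
    | some (.mk b ch') => b || pvDescend ch' cs

-- the outer loop over starting positions i = 0 .. n-1, as recursion on suffixes
def pvScanB (root : PTrieL) : List Char → Bool
  | [] => false
  | c :: cs => pvDescend root (c :: cs) || pvScanB root cs

def is_valid_source_url_alt (url : String) : Bool :=
  !(pvScanB (pvChildrenOf pvTrieB) url.toList)

-- ===== PRECONDITION & SPEC =====
def Spec_is_valid_source_url (url : String) (out : Bool) : Prop := out = is_valid_source_url_alt url
instance (url : String) (out : Bool) : Decidable (Spec_is_valid_source_url url out) := by unfold Spec_is_valid_source_url; infer_instance

-- ===== CLAIM (what is proved, stated in full; the proofs are below) =====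
def Claim_equal_is_valid_source_url : Prop := ∀ (url : String), Dom_is_valid_source_url url → Spec_is_valid_source_url url (is_valid_source_url url)

-- ===== LEMMAS AND PROOFS =====

-- case-insensitive prefix match of pattern p at the head of s
def pvCiPrefix : List Char → List Char → Bool
  | [], _ => true
  | _ :: _, [] => false
  | p :: ps, c :: cs => (PySem.Chars.lowerChar c == p) && pvCiPrefix ps cs

-- terminal flag of a node and the "match from this node" predicate
def pvTerm : PTrie → Bool
  | .mk b _ => b

def pvMFull : PTrie → List Char → Bool
  | .mk b ch, s => b || pvDescend ch s

theorem pvDescend_cons (ch : PTrieL) (c : Char) (cs : List Char) :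
    pvDescend ch (c :: cs) =
      (match pvChild ch (PySem.Chars.lowerChar c) with
       | none => false
       | some t => pvMFull t cs) := by
  cases h : pvChild ch (PySem.Chars.lowerChar c) with
  | none => simp [pvDescend, h]
  | some t =>
    cases t with
    | mk b ch' => cases cs <;> simp [pvDescend, h, pvMFull]

theorem pvDescend_nil (s : List Char) : pvDescend .nil s = false := by
  cases s <;> simp [pvDescend, pvChild]

theorem pvMFull_mk (b : Bool) (ch : PTrieL) (s : List Char) :
    pvMFull (.mk b ch) s = (b || pvDescend ch s) := rfl

theorem pvChild_childInsert : ∀ (ch : PTrieL) (a : Char) (cs : List Char) (x : Char),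
    pvChild (pvChildInsert ch a cs) x =
      if x = a then some (pvTrieInsert ((pvChild ch a).getD (.mk false .nil)) cs)
      else pvChild ch x
  | .nil, a, cs, x => by
    by_cases hxa : x = a
    · subst hxa; simp [pvChildInsert, pvChild]
    · have hax : ¬ a = x := fun h => hxa h.symm
      simp [pvChildInsert, pvChild, hxa, hax]
  | .cons c' t rest, a, cs, x => by
    have ih := pvChild_childInsert rest a cs x
    by_cases h1 : c' = a
    · subst h1
      by_cases hxa : x = c'
      · subst hxa; simp [pvChildInsert, pvChild]
      · have hcx : ¬ c' = x := fun h => hxa h.symm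
        simp [pvChildInsert, pvChild, hxa, hcx]
    · by_cases h2 : c' = x
      · subst h2
        simp [pvChildInsert, pvChild, h1]
      · simp [pvChildInsert, pvChild, h1, h2, ih]

theorem pvMFull_empty (s : List Char) : pvMFull (.mk false .nil) s = false := by
  simp [pvMFull, pvDescend_nil]

theorem pvMFull_insert (p : List Char) (t : PTrie) (s : List Char) :
    pvMFull (pvTrieInsert t p) s = (pvMFull t s || pvCiPrefix p s) := by
  induction p generalizing t s with
  | nil =>
    cases t with
    | mk b ch => simp [pvTrieInsert, pvMFull_mk, pvCiPrefix]
  | cons a ps ih =>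
    cases t with
    | mk b ch =>
      cases s with
      | nil =>
        simp [pvTrieInsert, pvMFull_mk, pvCiPrefix, pvDescend]
      | cons c cs =>
        simp only [pvTrieInsert, pvMFull_mk, pvDescend_cons, pvChild_childInsert, pvCiPrefix]
        by_cases hca : PySem.Chars.lowerChar c = a
        · rw [if_pos hca]
          cases h : pvChild ch a with
          | none =>
            rw [hca, h]
            cases b <;> simp [ih, pvMFull_empty]
          | some t0 =>
            rw [hca, h]
            cases b <;> simp [ih]
        · rw [if_neg hca]
          cases h : pvChild ch (PySem.Chars.lowerChar c) <;> simp [hca]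

theorem pvMFull_foldl (ps : List String) (t : PTrie) (s : List Char) :
    pvMFull (ps.foldl (fun t p => pvTrieInsert t p.toList) t) s =
      (pvMFull t s || ps.any (fun p => pvCiPrefix p.toList s)) := by
  induction ps generalizing t with
  | nil => simp
  | cons p rest ih =>
    simp [List.foldl_cons, ih, pvMFull_insert, Bool.or_assoc]

theorem pvTerm_insert (t : PTrie) (p : List Char) :
    pvTerm (pvTrieInsert t p) = (pvTerm t || p.isEmpty) := by
  cases t with
  | mk b ch => cases p <;> simp [pvTrieInsert, pvTerm]

theorem pvTerm_foldl (ps : List String) (t : PTrie) :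
    pvTerm (ps.foldl (fun t p => pvTrieInsert t p.toList) t) =
      (pvTerm t || ps.any (fun p => p.toList.isEmpty)) := by
  induction ps generalizing t with
  | nil => simp
  | cons p rest ih => simp [List.foldl_cons, ih, pvTerm_insert, Bool.or_assoc]

theorem pvTerm_trieB : pvTerm pvTrieB = false := by
  rw [pvTrieB, pvTerm_foldl]
  simp [pvTerm, pvPatsA]

theorem pvDescend_root (s : List Char) :
    pvDescend (pvChildrenOf pvTrieB) s = pvPatsA.any (fun p => pvCiPrefix p.toList s) := by
  have h1 : pvMFull pvTrieB s = pvPatsA.any (fun p => pvCiPrefix p.toList s) := by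
    rw [pvTrieB, pvMFull_foldl, pvMFull_empty]; simp
  cases htr : pvTrieB with
  | mk b ch =>
    have hb : b = false := by
      have := pvTerm_trieB; rw [htr] at this; simpa [pvTerm] using this
    rw [htr] at h1
    simp [pvMFull, hb] at h1
    simpa [pvChildrenOf] using h1

theorem pvCiPrefix_eq (p s : List Char) :
    pvCiPrefix p s = decide (p <+: PySem.Chars.lower s) := by
  induction p generalizing s with
  | nil => simp [pvCiPrefix]
  | cons a ps ih =>
    cases s with
    | nil => simp [pvCiPrefix, PySem.Chars.lower]
    | cons c cs =>
      apply Bool.eq_iff_iff.mpr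
      simp only [pvCiPrefix, PySem.Chars.lower, List.map_cons, List.cons_prefix_cons,
        Bool.and_eq_true, beq_iff_eq, decide_eq_true_eq, ih]
      constructor
      · rintro ⟨h1, h2⟩; exact ⟨h1.symm, h2⟩
      · rintro ⟨h1, h2⟩; exact ⟨h1.symm, h2⟩

theorem pvScanB_eq (s : List Char) :
    pvScanB (pvChildrenOf pvTrieB) s = pvPatsA.any (fun p => PySem.Chars.isIn p.toList (PySem.Chars.lower s)) := by
  induction s with
  | nil =>
    apply Bool.eq_iff_iff.mpr
    simp only [pvScanB, List.any_eq_true]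
    constructor
    · intro h; cases h
    · rintro ⟨p, hp, h⟩
      have := (PySem.Chars.isIn_iff_infix _ _).mp h
      fin_cases hp <;> simp_all [PySem.Chars.lower, List.infix_nil]
  | cons c cs ih =>
    have hlow : PySem.Chars.lower (c :: cs) = PySem.Chars.lowerChar c :: PySem.Chars.lower cs := rfl
    apply Bool.eq_iff_iff.mpr
    simp only [pvScanB, ih, pvDescend_root, pvCiPrefix_eq, hlow, List.any_eq_true,
      Bool.or_eq_true, decide_eq_true_eq, PySem.Chars.isIn_iff_infix, List.infix_cons_iff]
    constructor
    · rintro (⟨p, hp, h⟩ | ⟨p, hp, h⟩)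
      · exact ⟨p, hp, Or.inl h⟩
      · exact ⟨p, hp, Or.inr h⟩
    · rintro ⟨p, hp, h | h⟩
      · exact Or.inl ⟨p, hp, h⟩
      · exact Or.inr ⟨p, hp, h⟩

-- ===== VERDICT (by name: the statement is the Claim_ definition above) =====
theorem is_valid_source_url_spec : Claim_equal_is_valid_source_url := by
  intro url _
  unfold Spec_is_valid_source_url is_valid_source_url is_valid_source_url_alt
  rw [pvScanB_eq]
  simp [PySem.Str.isIn]
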